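-- pv_equiv track=rewrite | github.com/Heltev/adventofcode_2022 | 7/day7.py | get_directory_structure
-- ===== SOURCE A (Python) =====
-- def get_directory_structure(lines):
--   dir_structure = set()
--   tree = []
--   current_dir = ''
--   for x in range(len(lines)):
--     if '$' in lines[x]:
--       if ' cd ' in lines[x]:
--         if '..' not in lines[x]:
--           if current_dir != '':
--             current_dir += lines[x].split('cd ')[1]+'/'
--             dir_structure.add(current_dir)
--           else:
--             current_dir = '/'
--             dir_structure.add(current_dir)
--         else:
--           current_dir = current_dir.rsplit('/',2)[0]+'/'
--       elif ' ls' in lines[x]: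
--         y = x+1
--         while '$' not in lines[y]:
--           if 'dir ' not in lines[y]:
--             current_file = current_dir + lines[y].split(' ')[1]
--             size = int(lines[y].split(' ')[0])
--             tree.append([current_file,size])
--           y+=1
--           if y == len(lines):
--             break
--   return tree,dir_structure
-- ===== SOURCE B (Python) =====
-- def get_directory_structure(lines):
--     dir_structure = set()
--     tree = []
--     current_dir = ''
--     in_ls = False
--     for line in lines:
--         if '$' in line:
--             in_ls = False
--             if ' cd ' in line:
--                 if '..' not in line:
--                     if current_dir != '':
--                         current_dir += line.split('cd ')[1] + '/'
--                     else:
--                         current_dir = '/'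
--                     dir_structure.add(current_dir)
--                 else:
--                     current_dir = current_dir.rsplit('/', 2)[0] + '/'
--             elif ' ls' in line:
--                 in_ls = True
--         elif in_ls and 'dir ' not in line:
--             tree.append([current_dir + line.split(' ')[1], int(line.split(' ')[0])])
--     return tree, dir_structure
-- ===== Notes on version B (the rewrite author's own statement) =====
-- stated objective: simpler
-- what changed: Replaced A's nested index-based passes (an outer for over indices plus an inner forward-scanning while after each ls) by one flat pass over the lines with a boolean in_ls state flag.
-- outside the precondition, e.g. on get_directory_structure(['$ ls']): A raises IndexError, B returns ([], set())
import Mathlib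
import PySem

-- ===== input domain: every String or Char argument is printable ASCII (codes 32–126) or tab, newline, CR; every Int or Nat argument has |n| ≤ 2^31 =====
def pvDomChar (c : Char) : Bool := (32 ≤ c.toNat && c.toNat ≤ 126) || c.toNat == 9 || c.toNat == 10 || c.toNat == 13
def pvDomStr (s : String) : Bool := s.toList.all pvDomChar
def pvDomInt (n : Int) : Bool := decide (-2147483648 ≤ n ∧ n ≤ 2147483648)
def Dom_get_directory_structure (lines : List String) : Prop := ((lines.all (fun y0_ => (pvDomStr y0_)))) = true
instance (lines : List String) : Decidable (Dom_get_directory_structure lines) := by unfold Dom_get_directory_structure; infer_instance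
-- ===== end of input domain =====

-- B replaces A's nested passes (outer index loop + inner forward-scanning while after each ls)
-- by one flat pass over the lines with a boolean in_ls state flag; objective: simpler.

-- ===== PORT A =====
-- s.split(sep) for nonempty sep, via PySem.Chars.splitOn (exact)
def pvSplit (s sep : String) : List String :=
  (PySem.Chars.splitOn s.toList sep.toList).map String.ofList

-- shared port of the Python builtin expression s.rsplit('/', 2)[0] + '/'
def pvCdUp (s : String) : String :=
  let c1 := if PySem.Chars.rfind s.toList ['/'] = -1 then s.toList
            else s.toList.take (PySem.Chars.rfind s.toList ['/']).toNat
  let c2 := if PySem.Chars.rfind c1 ['/'] = -1 then c1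
            else c1.take (PySem.Chars.rfind c1 ['/']).toNat
  String.ofList (c2 ++ ['/'])

-- current_dir + lines[y].split(' ')[1] and int(lines[y].split(' ')[0]); defaults unreachable under Pre_
def pvFileEntry (cur s : String) : String × Int :=
  (cur ++ PySem.List.pyGetD (pvSplit s " ") 1 "",
   (PySem.Int.ofStr? (PySem.List.pyGetD (pvSplit s " ") 0 "")).getD 0)

-- the inner 'while "$" not in lines[y]' scan of A; pyGet? none = the IndexError Pre_ excludes
def pvScanA (lines : List String) (cur : String) (y : Nat) (tree : List (String × Int)) :
    List (String × Int) :=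
  match h : PySem.List.pyGet? lines (y : Int) with
  | none => tree
  | some s =>
    if PySem.Str.isIn "$" s then tree
    else
      let tree' := if PySem.Str.isIn "dir " s then tree else tree ++ [pvFileEntry cur s]
      if y + 1 = lines.length then tree'
      else pvScanA lines cur (y + 1) tree'
termination_by lines.length - y
decreasing_by
  have hy : y < lines.length := by
    by_contra hy
    rw [PySem.List.pyGet?_natCast, List.getElem?_eq_none (by omega)] at h
    simp at h
  omega

-- 'for x in range(len(lines))'
def pvOuterA (lines : List String) (x : Nat) (cur : String) (tree : List (String × Int))
    (dirs : PySem.Set String) : (List (String × Int)) × List String :=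
  if x < lines.length then
    let s := PySem.List.pyGetD lines (x : Int) ""
    if PySem.Str.isIn "$" s then
      if PySem.Str.isIn " cd " s then
        if ¬ PySem.Str.isIn ".." s then
          if cur ≠ "" then
            let nd := cur ++ PySem.List.pyGetD (pvSplit s "cd ") 1 "" ++ "/"
            pvOuterA lines (x + 1) nd tree (PySem.Set.add dirs nd)
          else
            pvOuterA lines (x + 1) "/" tree (PySem.Set.add dirs "/")
        else
          pvOuterA lines (x + 1) (pvCdUp cur) tree dirs
      else if PySem.Str.isIn " ls" s then
        pvOuterA lines (x + 1) cur (pvScanA lines cur (x + 1) tree) dirs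
      else
        pvOuterA lines (x + 1) cur tree dirs
    else
      pvOuterA lines (x + 1) cur tree dirs
  else (tree, dirs)
termination_by lines.length - x

def get_directory_structure (lines : List String) : (List (String × Int)) × List String :=
  pvOuterA lines 0 "" [] PySem.Set.empty

-- ===== PORT B =====
-- one step of B's flat loop; state = (current_dir, tree, dir_structure, in_ls)
def pvStepB (st : String × List (String × Int) × List String × Bool) (line : String) :
    String × List (String × Int) × List String × Bool :=
  let (cur, tree, dirs, inls) := st
  if PySem.Str.isIn "$" line then
    if PySem.Str.isIn " cd " line then
      if ¬ PySem.Str.isIn ".." line then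
        let nd := if cur ≠ "" then cur ++ PySem.List.pyGetD (pvSplit line "cd ") 1 "" ++ "/" else "/"
        (nd, tree, PySem.Set.add dirs nd, false)
      else (pvCdUp cur, tree, dirs, false)
    else if PySem.Str.isIn " ls" line then (cur, tree, dirs, true)
    else (cur, tree, dirs, false)
  else if inls && ¬ PySem.Str.isIn "dir " line then
    (cur, tree ++ [pvFileEntry cur line], dirs, inls)
  else st

def get_directory_structure_alt (lines : List String) : (List (String × Int)) × List String :=
  let st := lines.foldl pvStepB ("", [], PySem.Set.empty, false)
  (st.2.1, st.2.2.1)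

-- ===== PRECONDITION & SPEC =====
-- an '$ … ls' command line (enters A's inner scan)
def pvIsLs (s : String) : Bool :=
  PySem.Str.isIn "$" s && !PySem.Str.isIn " cd " s && PySem.Str.isIn " ls" s

-- a non-'$' line y that A's inner scan visits: the nearest '$' line above it is an ls command
def pvActive (lines : List String) (y : Nat) : Bool :=
  !PySem.Str.isIn "$" (lines.getD y "") &&
  (List.range y).any (fun x =>
    pvIsLs (lines.getD x "") &&
    (List.range y).all (fun z => decide (z ≤ x) || !PySem.Str.isIn "$" (lines.getD z "")))

-- every scanned file line parses: two space-separated fields, the first an int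
def pvParseOk (lines : List String) : Bool :=
  (List.range lines.length).all (fun y =>
    !pvActive lines y ||
    PySem.Str.isIn "dir " (lines.getD y "") ||
    (decide (2 ≤ (pvSplit (lines.getD y "") " ").length) &&
     (PySem.Int.ofStr? (PySem.List.pyGetD (pvSplit (lines.getD y "") " ") 0 "")).isSome))

-- Pre_ excludes exactly the inputs where Python A raises: an ls command as the last line
-- (IndexError in the inner scan), or a scanned file line whose fields do not parse
-- (IndexError/ValueError on split/int).
def Pre_get_directory_structure (lines : List String) : Prop :=
  (lines = [] ∨ pvIsLs (lines.getD (lines.length - 1) "") = false) ∧ pvParseOk lines = true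

instance (lines : List String) : Decidable (Pre_get_directory_structure lines) := by
  unfold Pre_get_directory_structure; infer_instance

def pvWitness_get_directory_structure : List String :=
  ["$ cd /", "$ ls", "dir a", "14 b.txt", "$ cd a", "$ ls", "7 c"]

def Spec_get_directory_structure (lines : List String) (out : (List (String × Int)) × List String) : Prop := out = get_directory_structure_alt lines
instance (lines : List String) (out : (List (String × Int)) × List String) : Decidable (Spec_get_directory_structure lines out) := by unfold Spec_get_directory_structure; infer_instance

-- ===== CLAIM (what is proved, stated in full; the proofs are below) =====
def Claim_equal_get_directory_structure : Prop := ∀ (lines : List String), Dom_get_directory_structure lines → Pre_get_directory_structure lines → Spec_get_directory_structure lines (get_directory_structure lines)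

-- ===== LEMMAS AND PROOFS =====

-- B's flag-true fold from position y produces the same output as pre-appending A's scan
-- of positions y… and folding with the flag off.
-- the inner scan returns its accumulator unchanged once y is past the end
lemma pvScanA_past (lines : List String) (cur : String) (y : Nat) (tree : List (String × Int))
    (hy : lines.length ≤ y) : pvScanA lines cur y tree = tree := by
  rw [pvScanA]
  split
  · rfl
  · next s h =>
    rw [PySem.List.pyGet?_natCast, List.getElem?_eq_none hy] at h
    simp at h

-- the inner scan stops immediately on a '$' line
lemma pvScanA_dollar (lines : List String) (cur : String) (y : Nat) (tree : List (String × Int))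
    (hy : y < lines.length) (hd : PySem.Str.isIn "$" lines[y] = true) :
    pvScanA lines cur y tree = tree := by
  rw [pvScanA]
  split
  · rfl
  · next s h =>
    rw [PySem.List.pyGet?_natCast, List.getElem?_eq_getElem hy] at h
    cases h
    rw [if_pos hd]

-- one step of the inner scan on a non-'$' line
lemma pvScanA_step (lines : List String) (cur : String) (y : Nat) (tree : List (String × Int))
    (hy : y < lines.length) (hd : PySem.Str.isIn "$" lines[y] = false) :
    pvScanA lines cur y tree =
      (let tree' := if PySem.Str.isIn "dir " lines[y] then tree else tree ++ [pvFileEntry cur lines[y]]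
       if y + 1 = lines.length then tree' else pvScanA lines cur (y + 1) tree') := by
  conv_lhs => rw [pvScanA]
  split
  · next h =>
    rw [PySem.List.pyGet?_natCast, List.getElem?_eq_getElem hy] at h
    simp at h
  · next s h =>
    rw [PySem.List.pyGet?_natCast, List.getElem?_eq_getElem hy] at h
    cases h
    rw [if_neg (by intro hc; rw [hc] at hd; exact Bool.noConfusion hd)]

-- a '$' line resets the flag identically from either flag state
lemma pvStepB_dollar (cur : String) (tree : List (String × Int)) (dirs : List String)
    (b b' : Bool) (s : String) (hd : PySem.Str.isIn "$" s = true) :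
    pvStepB (cur, tree, dirs, b) s = pvStepB (cur, tree, dirs, b') s := by
  simp only [pvStepB, hd, if_true]

-- B's flag-true fold from position y produces the same output as pre-appending A's scan
-- of positions y… and folding with the flag off.
lemma pv_scan_fold (lines : List String) :
    ∀ k y cur tree dirs, lines.length - y ≤ k →
      (((lines.drop y).foldl pvStepB (cur, tree, dirs, true)).2.1,
       ((lines.drop y).foldl pvStepB (cur, tree, dirs, true)).2.2.1) =
      (((lines.drop y).foldl pvStepB (cur, pvScanA lines cur y tree, dirs, false)).2.1,
       ((lines.drop y).foldl pvStepB (cur, pvScanA lines cur y tree, dirs, false)).2.2.1) := by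
  intro k
  induction k with
  | zero =>
    intro y cur tree dirs hk
    rw [List.drop_eq_nil_of_le (by omega), pvScanA_past lines cur y tree (by omega)]
    simp
  | succ k ih =>
    intro y cur tree dirs hk
    by_cases hy : y < lines.length
    · rw [List.drop_eq_getElem_cons hy, List.foldl_cons, List.foldl_cons]
      by_cases hd : PySem.Str.isIn "$" lines[y] = true
      · rw [pvScanA_dollar lines cur y tree hy hd, pvStepB_dollar cur tree dirs true false lines[y] hd]
      · rw [pvScanA_step lines cur y tree hy (by simpa using hd)]
        simp only [pvStepB, hd, Bool.false_eq_true, if_false, Bool.true_and, decide_not]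
        by_cases hdir : PySem.Str.isIn "dir " lines[y] = true
        · simp only [hdir, if_true, decide_true, Bool.not_true, Bool.false_eq_true, if_false]
          by_cases hlast : y + 1 = lines.length
          · simp only [hlast, if_true]
            rw [List.drop_eq_nil_of_le (by omega)]
            simp
          · simp only [hlast, if_false]
            exact ih (y + 1) cur tree dirs (by omega)
        · simp only [hdir, Bool.false_eq_true, if_false, decide_false, Bool.not_false, if_true]
          by_cases hlast : y + 1 = lines.length
          · simp only [hlast, if_true]
            rw [List.drop_eq_nil_of_le (by omega)]
            simp
          · simp only [hlast, if_false]
            exact ih (y + 1) cur (tree ++ [pvFileEntry cur lines[y]]) dirs (by omega)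
    · rw [List.drop_eq_nil_of_le (by omega), pvScanA_past lines cur y tree (by omega)]
      simp

-- A's outer index loop from x equals B's flag-off fold over the remaining lines.
lemma pv_outer_fold (lines : List String) :
    ∀ k x cur tree dirs, lines.length - x ≤ k →
      pvOuterA lines x cur tree dirs =
      (((lines.drop x).foldl pvStepB (cur, tree, dirs, false)).2.1,
       ((lines.drop x).foldl pvStepB (cur, tree, dirs, false)).2.2.1) := by
  intro k
  induction k with
  | zero =>
    intro x cur tree dirs hk
    rw [pvOuterA, List.drop_eq_nil_of_le (by omega)]
    simp only [if_neg (by omega : ¬ x < lines.length), List.foldl_nil]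
  | succ k ih =>
    intro x cur tree dirs hk
    by_cases hx : x < lines.length
    · have hget : PySem.List.pyGetD lines (x : Int) "" = lines[x] := by
        rw [PySem.List.pyGetD_natCast, List.getD_eq_getElem?_getD, List.getElem?_eq_getElem hx,
          Option.getD_some]
      rw [pvOuterA, List.drop_eq_getElem_cons hx, List.foldl_cons]
      simp only [if_pos hx, hget]
      by_cases hd : PySem.Str.isIn "$" lines[x] = true
      · simp only [hd, if_true]
        by_cases hcd : PySem.Str.isIn " cd " lines[x] = true
        · simp only [hcd, if_true]
          by_cases hup : PySem.Str.isIn ".." lines[x] = true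
          · simp only [hup, not_true, if_false, ite_not]
            rw [ih (x + 1) (pvCdUp cur) tree dirs (by omega)]
            simp at hd hcd hup
            simp [pvStepB, hd, hcd, hup]
          · simp only [hup, not_false_iff, Bool.false_eq_true, ite_not]
            by_cases hcur : cur = ""
            · simp only [hcur, reduceIte]
              rw [ih (x + 1) "/" tree (PySem.Set.add dirs "/") (by omega)]
              simp at hd hcd hup
              simp [pvStepB, hd, hcd, hup]
            · simp only [if_neg hcur, reduceIte]
              rw [ih (x + 1) (cur ++ PySem.List.pyGetD (pvSplit lines[x] "cd ") 1 "" ++ "/") tree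
                (PySem.Set.add dirs (cur ++ PySem.List.pyGetD (pvSplit lines[x] "cd ") 1 "" ++ "/"))
                (by omega)]
              simp at hd hcd hup
              simp [pvStepB, hd, hcd, hup, hcur]
        · simp only [hcd, Bool.false_eq_true, if_false]
          by_cases hls : PySem.Str.isIn " ls" lines[x] = true
          · simp only [hls, if_true]
            rw [ih (x + 1) cur (pvScanA lines cur (x + 1) tree) dirs (by omega)]
            have hstep : pvStepB (cur, tree, dirs, false) lines[x] = (cur, tree, dirs, true) := by
              simp only [pvStepB, hd, hcd, hls, Bool.false_eq_true, if_false, if_true]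
            rw [hstep, ← pv_scan_fold lines (lines.length - (x + 1)) (x + 1) cur tree dirs (by omega)]
          · simp only [hls, Bool.false_eq_true, if_false]
            rw [ih (x + 1) cur tree dirs (by omega)]
            have hstep : pvStepB (cur, tree, dirs, false) lines[x] = (cur, tree, dirs, false) := by
              simp only [pvStepB, hd, hcd, hls, Bool.false_eq_true, if_false]
              simp
            rw [hstep]
      · simp only [hd, Bool.false_eq_true, if_false]
        rw [ih (x + 1) cur tree dirs (by omega)]
        have hstep : pvStepB (cur, tree, dirs, false) lines[x] = (cur, tree, dirs, false) := by
          simp only [pvStepB, hd, Bool.false_eq_true, if_false, Bool.false_and]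
        rw [hstep]
    · rw [pvOuterA, List.drop_eq_nil_of_le (by omega)]
      simp only [if_neg hx, List.foldl_nil]

-- ===== VERDICT (by name: the statement is the Claim_ definition above) =====
theorem get_directory_structure_spec : Claim_equal_get_directory_structure := by
  intro lines _ _
  unfold Spec_get_directory_structure get_directory_structure get_directory_structure_alt
  simpa using pv_outer_fold lines lines.length 0 "" [] PySem.Set.empty (by omega)
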